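-- pv_equiv track=rewrite | github.com/joshuashevchuk1/LeetHackerQuestionsStudy | leet/look over/leet2355.py | maximumBooks
-- ===== SOURCE A (Python) =====
-- from typing import List
--
-- def maximumBooks(books: List[int]) -> int:
--     n = len(books)
--
--     # Helper function to calculate the sum of books in a given range [l, r]
--     def calculateSum(l, r):
--         cnt = min(books[r], r - l + 1)
--         return (2 * books[r] - (cnt - 1)) * cnt // 2
--
--     stack = []
--     dp = [0] * n
--
--     for i in range(n):
--         # While we cannot push i, we pop from the stack
--         while stack and books[stack[-1]] - stack[-1] >= books[i] - i:
--             stack.pop()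
--
--         # Compute dp[i]
--         if not stack:
--             dp[i] = calculateSum(0, i)
--         else:
--             j = stack[-1]
--             dp[i] = dp[j] + calculateSum(j + 1, i)
--
--         # Push the current index onto the stack
--         stack.append(i)
--
--     # Return the maximum element in the dp array
--     return max(dp)
-- ===== SOURCE B (Python) =====
-- def maximumBooks(books):
--     n = len(books)
--
--     def seg(l, r):
--         cnt = min(books[r], r - l + 1)
--         return (2 * books[r] - (cnt - 1)) * cnt // 2
--
--     def prev_smaller(i):
--         # nearest j < i with books[j] - j < books[i] - i, or -1
--         key = books[i] - i
--         j = i - 1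
--         while j >= 0 and books[j] - j >= key:
--             j -= 1
--         return j
--
--     memo = {}
--
--     def best(i):
--         if i not in memo:
--             j = prev_smaller(i)
--             memo[i] = seg(0, i) if j < 0 else best(j) + seg(j + 1, i)
--         return memo[i]
--
--     return max(best(i) for i in range(n))
-- ===== Notes on version B (the rewrite author's own statement) =====
-- stated objective: alternative
-- what changed: Replaces the monotonic-stack fold with a memoized top-down recursion: each index's value is defined from its nearest previous strictly-smaller key found by a direct backward scan, and the answer is the max over all indices.
-- outside the precondition, e.g. on maximumBooks([]): A raises ValueError, B raises ValueError
import Mathlib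
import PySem

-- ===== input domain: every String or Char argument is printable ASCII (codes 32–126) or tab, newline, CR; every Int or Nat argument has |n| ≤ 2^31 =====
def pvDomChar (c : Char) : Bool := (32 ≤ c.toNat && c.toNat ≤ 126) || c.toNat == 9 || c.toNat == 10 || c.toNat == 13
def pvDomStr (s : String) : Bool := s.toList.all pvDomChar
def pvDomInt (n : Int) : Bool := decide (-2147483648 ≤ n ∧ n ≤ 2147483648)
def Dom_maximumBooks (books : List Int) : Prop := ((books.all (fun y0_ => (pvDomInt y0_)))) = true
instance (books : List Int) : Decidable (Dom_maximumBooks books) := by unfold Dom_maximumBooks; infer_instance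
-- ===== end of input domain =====

-- B replaces A's monotonic stack by a memoized top-down recursion on the nearest
-- previous strictly-smaller key found by a backward scan (alternative; not faster).


-- shared helper: Python's inner calculateSum/seg(l, r) (textually identical in A and B)
def pvCalcSum (books : List Int) (l r : Nat) : Int :=
  let cnt := min (books.getD r 0) ((r : Int) - (l : Int) + 1)
  PySem.Int.floordiv ((2 * books.getD r 0 - (cnt - 1)) * cnt) 2

-- ===== PORT A =====
-- the `while stack and books[stack[-1]] - stack[-1] >= books[i] - i: stack.pop()` loop
-- (stack kept head-first: head = Python's stack[-1])
def pvPopA (books : List Int) (i : Nat) : List Nat → List Nat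
  | [] => []
  | j :: rest =>
    if books.getD j 0 - (j : Int) ≥ books.getD i 0 - (i : Int) then pvPopA books i rest
    else j :: rest

-- one iteration of A's `for i in range(n)` loop over state (stack, dp)
def pvStepA (books : List Int) (s : List Nat × List Int) (i : Nat) : List Nat × List Int :=
  let st := pvPopA books i s.1
  let v := match st with
    | [] => pvCalcSum books 0 i
    | j :: _ => s.2.getD j 0 + pvCalcSum books (j + 1) i
  (i :: st, s.2 ++ [v])

def maximumBooks (books : List Int) : Int :=
  let dp := ((List.range books.length).foldl (pvStepA books) ([], [])).2
  ((PySem.List.max? dp (fun x => x)).getD 0)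

-- ===== PORT B =====
-- B's prev_smaller backward scan `j = i-1; while j >= 0 and books[j]-j >= key: j -= 1`:
-- none = Python's -1 (scan ran past index 0)
def pvPrevB (books : List Int) (ki : Int) : Nat → Option Nat
  | 0 => none
  | j + 1 => if books.getD j 0 - (j : Int) ≥ ki then pvPrevB books ki j else some j

theorem pvPrevB_some_lt {books : List Int} {ki : Int} {m j : Nat}
    (h : pvPrevB books ki m = some j) : j < m := by
  induction m with
  | zero => simp [pvPrevB] at h
  | succ t ih =>
    simp only [pvPrevB] at h
    split at h
    · exact Nat.lt_succ_of_lt (ih h)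
    · rw [Option.some_inj] at h; omega

-- B's memoized `best(i)`: the memo dict caches a pure function, so the port is the
-- recursion itself (terminating because prev_smaller returns a strictly smaller index)
def pvBest (books : List Int) : Nat → Int
  | i =>
    match hp : pvPrevB books (books.getD i 0 - (i : Int)) i with
    | none => pvCalcSum books 0 i
    | some j => pvBest books j + pvCalcSum books (j + 1) i
decreasing_by exact pvPrevB_some_lt hp

def maximumBooks_alt (books : List Int) : Int :=
  ((PySem.List.max? ((List.range books.length).map (pvBest books)) (fun x => x)).getD 0)

-- ===== PRECONDITION & SPEC =====
-- Both Pythons raise ValueError (max of an empty sequence) on books = []; excluded.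
def Pre_maximumBooks (books : List Int) : Prop := books ≠ []
instance (books : List Int) : Decidable (Pre_maximumBooks books) := by unfold Pre_maximumBooks; infer_instance
def pvWitness_maximumBooks : List Int := [1, 5, 2, 3]

def Spec_maximumBooks (books : List Int) (out : Int) : Prop := out = maximumBooks_alt books
instance (books : List Int) (out : Int) : Decidable (Spec_maximumBooks books out) := by unfold Spec_maximumBooks; infer_instance

-- ===== CLAIM (what is proved, stated in full; the proofs are below) =====
def Claim_equal_maximumBooks : Prop := ∀ (books : List Int), Dom_maximumBooks books → Pre_maximumBooks books → Spec_maximumBooks books (maximumBooks books)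

-- ===== LEMMAS AND PROOFS =====

-- the key books[j] - j that both programs compare
def pvKey (books : List Int) (j : Nat) : Int := books.getD j 0 - (j : Int)

theorem pvPrevB_some_spec {books : List Int} {ki : Int} {m j : Nat}
    (h : pvPrevB books ki m = some j) :
    pvKey books j < ki ∧ ∀ t, j < t → t < m → ki ≤ pvKey books t := by
  induction m with
  | zero => simp [pvPrevB] at h
  | succ n ih =>
    by_cases hc : books.getD n 0 - (n : Int) ≥ ki
    · rw [show pvPrevB books ki (n + 1) = pvPrevB books ki n from by
        simp only [pvPrevB, if_pos hc]] at h
      obtain ⟨h1, h2⟩ := ih h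
      refine ⟨h1, fun u hju hu => ?_⟩
      by_cases hun : u < n
      · exact h2 u hju hun
      · have hu' : u = n := by omega
        subst hu'; exact hc
    · rw [show pvPrevB books ki (n + 1) = some n from by
        simp only [pvPrevB, if_neg hc]] at h
      cases h
      exact ⟨lt_of_not_ge hc, fun u hju hu => by omega⟩

theorem pvPrevB_none_spec {books : List Int} {ki : Int} {m : Nat}
    (h : pvPrevB books ki m = none) : ∀ j, j < m → ki ≤ pvKey books j := by
  induction m with
  | zero => intro j hj; omega
  | succ n ih =>
    by_cases hc : books.getD n 0 - (n : Int) ≥ ki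
    · rw [show pvPrevB books ki (n + 1) = pvPrevB books ki n from by
        simp only [pvPrevB, if_pos hc]] at h
      intro j hj
      by_cases hjn : j < n
      · exact ih h j hjn
      · have hj' : j = n := by omega
        subst hj'; exact hc
    · rw [show pvPrevB books ki (n + 1) = some n from by
        simp only [pvPrevB, if_neg hc]] at h
      cases h

theorem pvPrevB_of_all_ge {books : List Int} {ki : Int} {m : Nat}
    (h : ∀ j, j < m → ki ≤ pvKey books j) : pvPrevB books ki m = none := by
  induction m with
  | zero => rfl
  | succ n ih =>
    have hn : books.getD n 0 - (n : Int) ≥ ki := h n (Nat.lt_succ_self n)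
    rw [show pvPrevB books ki (n + 1) = pvPrevB books ki n from by
      simp only [pvPrevB, if_pos hn]]
    exact ih fun j hj => h j (Nat.lt_succ_of_lt hj)

theorem pvPrevB_skip {books : List Int} {ki : Int} {j m : Nat}
    (hjm : j < m) (h : ∀ t, j < t → t < m → ki ≤ pvKey books t) :
    pvPrevB books ki m = pvPrevB books ki (j + 1) := by
  induction m with
  | zero => omega
  | succ n ih =>
    by_cases hj' : j < n
    · have hn : books.getD n 0 - (n : Int) ≥ ki := h n hj' (Nat.lt_succ_self n)
      rw [show pvPrevB books ki (n + 1) = pvPrevB books ki n from by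
        simp only [pvPrevB, if_pos hn]]
      exact ih hj' fun u hju hu => h u hju (Nat.lt_succ_of_lt hu)
    · have hj'' : j = n := by omega
      subst hj''; rfl

-- the monotonic chain A's stack holds after processing index m (head = stack top)
def pvChain (books : List Int) : Nat → List Nat
  | m =>
    m :: (match hp : pvPrevB books (books.getD m 0 - (m : Int)) m with
      | none => []
      | some j => pvChain books j)
decreasing_by exact pvPrevB_some_lt hp

def pvChainO (books : List Int) : Option Nat → List Nat
  | none => []
  | some j => pvChain books j

theorem pvChain_eq (books : List Int) (m : Nat) :
    pvChain books m = m :: pvChainO books (pvPrevB books (books.getD m 0 - (m : Int)) m) := by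
  rw [pvChain]
  cases hp : pvPrevB books (books.getD m 0 - (m : Int)) m <;> simp [pvChainO]

-- core lemma: popping A's stack (= the chain at m) lands exactly where B's scan stops
theorem pop_chain (books : List Int) (i : Nat) : ∀ m,
    pvPopA books i (pvChain books m)
      = pvChainO books (pvPrevB books (books.getD i 0 - (i : Int)) (m + 1)) := by
  intro m
  induction m using Nat.strong_induction_on with
  | _ m ih =>
    rw [pvChain_eq]
    by_cases hc : books.getD m 0 - (m : Int) ≥ books.getD i 0 - (i : Int)
    · -- m gets popped
      rw [show pvPrevB books (books.getD i 0 - (i : Int)) (m + 1)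
            = pvPrevB books (books.getD i 0 - (i : Int)) m from by
        simp only [pvPrevB, if_pos hc]]
      simp only [pvPopA, if_pos hc]
      cases hp : pvPrevB books (books.getD m 0 - (m : Int)) m with
      | none =>
        have hall : ∀ j, j < m → books.getD i 0 - (i : Int) ≤ pvKey books j := fun j hj =>
          le_trans hc (pvPrevB_none_spec hp j hj)
        rw [pvPrevB_of_all_ge hall]
        simp [pvChainO, pvPopA]
      | some j =>
        obtain ⟨_, hskip⟩ := pvPrevB_some_spec hp
        have hjm : j < m := pvPrevB_some_lt hp
        rw [pvPrevB_skip hjm fun t hjt htm => le_trans hc (hskip t hjt htm)]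
        simpa [pvChainO] using ih j hjm
    · -- m stays: B's scan stops at m too
      simp only [pvPopA, if_neg hc]
      rw [show pvPrevB books (books.getD i 0 - (i : Int)) (m + 1) = some m from by
        simp only [pvPrevB, if_neg hc]]
      rw [pvChainO, ← pvChain_eq]

-- A's stack after processing range i
def pvStackOf (books : List Int) : Nat → List Nat
  | 0 => []
  | m + 1 => pvChain books m

theorem map_range_getD (f : Nat → Int) {j m : Nat} (h : j < m) :
    ((List.range m).map f).getD j 0 = f j := by
  rw [List.getD_eq_getElem _ _ (by simpa using h)]
  simp

-- loop invariant: A's fold state = (the chain, the table of B's best values)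
theorem pv_inv (books : List Int) : ∀ i : Nat,
    (List.range i).foldl (pvStepA books) ([], []) =
      (pvStackOf books i, (List.range i).map (pvBest books)) := by
  intro i
  induction i with
  | zero => rfl
  | succ m ih =>
    rw [List.range_succ, List.foldl_append, ih, List.map_append]
    simp only [List.foldl_cons, List.foldl_nil, List.map_cons, List.map_nil]
    have hpop : pvPopA books m (pvStackOf books m)
        = pvChainO books (pvPrevB books (books.getD m 0 - (m : Int)) m) := by
      cases m with
      | zero => rfl
      | succ t => exact pop_chain books (t + 1) t
    show pvStepA books (pvStackOf books m, (List.range m).map (pvBest books)) m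
        = (pvChain books m, (List.range m).map (pvBest books) ++ [pvBest books m])
    unfold pvStepA
    rw [hpop, pvChain_eq books m, pvBest]
    cases hp : pvPrevB books (books.getD m 0 - (m : Int)) m with
    | none => simp [pvChainO]
    | some j =>
      simp only [pvChainO]
      rw [pvChain_eq books j]
      simp only [Prod.mk.injEq, true_and, List.append_cancel_left_eq, List.cons.injEq, and_true]
      rw [map_range_getD _ (pvPrevB_some_lt hp)]

-- ===== VERDICT (by name: the statement is the Claim_ definition above) =====
theorem maximumBooks_spec : Claim_equal_maximumBooks := by
  intro books _ _
  unfold Spec_maximumBooks maximumBooks maximumBooks_alt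
  rw [pv_inv books books.length]
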